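-- pv_equiv track=rewrite | github.com/sajibAdhi/HackerRank | Python/Basic Data Types/Nested-Lists.py | secondLowestNumber
-- ===== SOURCE A (Python) =====
-- def secondLowestNumber(elements, lowestElemtnt):
--     """Get Second Lowest Number form any List()"""
--     secondLowest = None
--     for element in elements:
--         if(element > lowestElemtnt):
--             if(secondLowest is None):
--                 secondLowest = element
--             elif(secondLowest > element):
--                 secondLowest = element
--     return secondLowest
-- ===== SOURCE B (Python) =====
-- def secondLowestNumber(elements, lowestElemtnt):
--     """Get Second Lowest Number form any List()"""
--     cands = [e for e in elements if e > lowestElemtnt]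
--     return None if not cands else sorted(cands)[0]
-- ===== Notes on version B (the rewrite author's own statement) =====
-- stated objective: alternative
-- what changed: Replaces the single-pass min-tracking loop with a filter comprehension followed by sorting the candidates and taking the first element.
import Mathlib
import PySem

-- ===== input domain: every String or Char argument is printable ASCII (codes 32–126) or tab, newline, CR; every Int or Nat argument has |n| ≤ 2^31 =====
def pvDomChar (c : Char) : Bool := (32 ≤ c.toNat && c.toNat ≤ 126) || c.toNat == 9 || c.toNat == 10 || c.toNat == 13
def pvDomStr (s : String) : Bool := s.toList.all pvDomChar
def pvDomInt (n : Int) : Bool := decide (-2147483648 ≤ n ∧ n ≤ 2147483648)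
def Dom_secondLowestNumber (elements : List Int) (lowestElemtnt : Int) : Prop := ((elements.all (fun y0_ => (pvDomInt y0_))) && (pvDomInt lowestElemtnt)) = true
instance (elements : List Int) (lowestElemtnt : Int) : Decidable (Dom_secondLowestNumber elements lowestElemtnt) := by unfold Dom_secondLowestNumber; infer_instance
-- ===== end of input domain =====

-- B replaces A's single-pass min-tracking loop by filter-then-sort-then-head (alternative decomposition, same return value).

-- ===== PORT A =====
def secondLowestNumber (elements : List Int) (lowestElemtnt : Int) : Option Int :=
  elements.foldl (fun secondLowest element =>
    if element > lowestElemtnt then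
      match secondLowest with
      | none => some element
      | some m => if m > element then some element else secondLowest
    else secondLowest) none

-- ===== PORT B =====
def secondLowestNumber_alt (elements : List Int) (lowestElemtnt : Int) : Option Int :=
  let cands := elements.filter (fun e => decide (e > lowestElemtnt))
  if cands.isEmpty then none
  else PySem.List.pyGet? (PySem.List.sorted cands (fun x => x) false) 0

-- ===== PRECONDITION & SPEC =====
def Spec_secondLowestNumber (elements : List Int) (lowestElemtnt : Int) (out : Option Int) : Prop := out = secondLowestNumber_alt elements lowestElemtnt
instance (elements : List Int) (lowestElemtnt : Int) (out : Option Int) : Decidable (Spec_secondLowestNumber elements lowestElemtnt out) := by unfold Spec_secondLowestNumber; infer_instance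

-- ===== CLAIM (what is proved, stated in full; the proofs are below) =====
def Claim_equal_secondLowestNumber : Prop := ∀ (elements : List Int) (lowestElemtnt : Int), Dom_secondLowestNumber elements lowestElemtnt → Spec_secondLowestNumber elements lowestElemtnt (secondLowestNumber elements lowestElemtnt)

-- ===== LEMMAS AND PROOFS =====

-- A's loop skips non-candidates: it is the min-tracking fold over the filtered list.
theorem pvA_eq_fold (elements : List Int) (low : Int) :
    secondLowestNumber elements low =
      (elements.filter (fun e => decide (e > low))).foldl
        (fun o e => match o with | none => some e | some m => if m > e then some e else o) none := by
  unfold secondLowestNumber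
  generalize (none : Option Int) = o
  induction elements generalizing o with
  | nil => rfl
  | cons x t ih =>
    simp only [List.foldl_cons, List.filter_cons]
    by_cases h : x > low
    · simp [h, ih]
    · simp [h, ih]

-- Once the accumulator is some m, the fold computes the running minimum.
theorem pvFold_min (t : List Int) (m : Int) :
    t.foldl (fun o e => match o with | none => some e | some m => if m > e then some e else o) (some m)
      = some (t.foldl min m) := by
  induction t generalizing m with
  | nil => rfl
  | cons x t ih =>
    simp only [List.foldl_cons]
    split_ifs with h
    · rw [ih, min_eq_right (by omega : x ≤ m)]
    · rw [ih, min_eq_left (by omega : m ≤ x)]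

-- ===== VERDICT (by name: the statement is the Claim_ definition above) =====
theorem secondLowestNumber_spec : Claim_equal_secondLowestNumber := by
  intro elements low _
  unfold Spec_secondLowestNumber secondLowestNumber_alt
  rw [pvA_eq_fold]
  rcases h : elements.filter (fun e => decide (e > low)) with _ | ⟨x, t⟩
  · simp
  · simp only [List.isEmpty_cons, Bool.false_eq_true, if_false, List.foldl_cons, pvFold_min]
    rcases hs : PySem.List.sorted (x :: t) (fun y => y) false with _ | ⟨m, ts⟩
    · exact absurd ((PySem.List.sorted_eq_nil_iff (x :: t) (fun y => y) false).mp hs) (by simp)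
    · have hmem : m ∈ x :: t :=
        (PySem.List.mem_sorted (x :: t) (fun y => y) false m).mp (by rw [hs]; simp)
      have hle : ∀ y ∈ x :: t, m ≤ y := PySem.List.key_head_sorted_le (x :: t) (fun y => y) hs
      have hmin : PySem.List.min? (x :: t) (fun y => y) = some (t.foldl min x) :=
        PySem.List.min?_id_cons x t
      have hmem' : t.foldl min x ∈ x :: t := PySem.List.min?_mem hmin
      have hle' : ∀ y ∈ x :: t, t.foldl min x ≤ y := PySem.List.min?_isMin hmin
      have hm : m = t.foldl min x := le_antisymm (hle _ hmem') (hle' _ hmem)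
      simp [PySem.List.pyGet?, PySem.List.pyIdx?, hm]
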